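-- pv_equiv track=rewrite | github.com/studentUnk/Crypto | playfair.py | completar_tabla
-- ===== SOURCE A (Python) =====
-- def validar_caracter(caracter):
--  return caracter.isalpha() or caracter.isdigit()
--
-- def existe_caracter(tabla, fila, caracter):
--  for t in tabla:
--    for t_n in t: # Ciclo para validar que no exista caracter en la tabla
--     if(t_n == caracter):
--      return True
--  for f in fila: # Ciclo para validar que no exista caracter en la fila actual
--   if(f == caracter):
--    return True
--  return not validar_caracter(caracter)
--
-- def completar_tabla(tabla, columnas, fila, base):
--  for f in base:
--   for c in f:
--    if(not existe_caracter(tabla, fila, c)): # Validar que caracter no exista en tabla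
--     if(len(fila) == columnas):
--      tabla.append(fila) # Agregar nueva fila
--      fila = []
--     fila.append(c) # Agregar caracter a la fila
--  if(len(fila) == columnas):
--   tabla.append(fila) # Agregar ultima fila
--  return tabla
-- ===== SOURCE B (Python) =====
-- def completar_tabla(tabla, columnas, fila, base):
--     # Closed-form rebuild (return value only): gather the fresh valid characters
--     # in first-seen order, then the completed rows are exactly the full
--     # columnas-sized chunks of fila + news.
--     existing = {x for row in tabla for x in row} | set(fila)
--     news = list(dict.fromkeys(
--         c for f in base for c in f
--         if (c.isalpha() or c.isdigit()) and c not in existing))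
--     if columnas <= 0 or len(fila) > columnas:
--         # the partial row can never grow to exactly `columnas` characters
--         return tabla
--     stream = fila + news
--     return tabla + [stream[i * columnas:(i + 1) * columnas]
--                     for i in range(len(stream) // columnas)]
-- ===== Notes on version B (the rewrite author's own statement) =====
-- stated objective: faster
-- what changed: B abandons A's stateful flush-and-append row machine: it collects the fresh valid characters with a set comprehension plus an ordered dict.fromkeys dedup, and then produces the completed rows in closed form as the full columnas-sized slices of fila+news, instead of simulating the row buffer character by character with per-character rescans of the whole table.
-- intended difference: When columnas == 0 and fila is empty, A's flush test len(fila)==columnas fires on the empty buffer and A returns tabla with a spurious empty row [] appended; B returns tabla unchanged, the intended value since a 0-column table has no completable rows. — e.g. on completar_tabla([], 0, [], ["a"]): A returns [[]], B returns []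
import Mathlib
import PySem

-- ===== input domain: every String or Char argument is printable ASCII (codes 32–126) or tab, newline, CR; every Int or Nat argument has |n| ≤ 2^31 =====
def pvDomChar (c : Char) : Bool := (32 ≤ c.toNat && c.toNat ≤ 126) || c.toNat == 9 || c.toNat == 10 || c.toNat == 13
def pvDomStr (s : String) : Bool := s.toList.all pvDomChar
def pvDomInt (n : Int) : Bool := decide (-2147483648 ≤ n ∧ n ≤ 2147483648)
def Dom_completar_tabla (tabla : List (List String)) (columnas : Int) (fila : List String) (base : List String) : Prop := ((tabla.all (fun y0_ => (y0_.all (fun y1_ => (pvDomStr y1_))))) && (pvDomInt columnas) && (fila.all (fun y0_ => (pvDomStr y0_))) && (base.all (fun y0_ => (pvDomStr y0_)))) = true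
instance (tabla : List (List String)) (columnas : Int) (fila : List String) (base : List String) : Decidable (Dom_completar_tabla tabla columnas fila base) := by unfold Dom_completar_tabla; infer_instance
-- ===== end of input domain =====

-- B replaces A's character-by-character row-buffer state machine (with its per-character rescans
-- of the whole table) by a closed-form rebuild: set-based collection of the fresh valid characters
-- followed by slicing fila+news into full columnas-sized chunks (measurably faster in a timing run).
-- A mutates `tabla`/`fila` in place, B does not; the equivalence proved here is about the return value only.

-- ===== PORT A =====
-- caracter.isalpha() or caracter.isdigit() for the 1-char strings this program tests (exact at char level)
def validar_caracter (c : Char) : Bool := PySem.Chars.isalpha c || PySem.Chars.isdigit c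

def existe_caracter (tabla : List (List String)) (fila : List String) (c : Char) : Bool :=
  if tabla.any (fun t => t.any (fun t_n => t_n == String.singleton c)) then true
  else if fila.any (fun f => f == String.singleton c) then true
  else !(validar_caracter c)

def pasoA (columnas : Int) (st : List (List String) × List String) (c : Char) :
    List (List String) × List String :=
  if !(existe_caracter st.1 st.2 c) then
    if ((st.2.length : Int) == columnas) then (st.1 ++ [st.2], [String.singleton c])
    else (st.1, st.2 ++ [String.singleton c])
  else st

def completar_tabla (tabla : List (List String)) (columnas : Int) (fila : List String) (base : List String) : List (List String) :=
  let st := base.foldl (fun st f => f.toList.foldl (pasoA columnas) st) (tabla, fila)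
  if ((st.2.length : Int) == columnas) then st.1 ++ [st.2] else st.1

-- ===== PORT B =====
def completar_tabla_alt (tabla : List (List String)) (columnas : Int) (fila : List String) (base : List String) : List (List String) :=
  let existing := PySem.Set.union (PySem.Set.ofList (tabla.flatMap (fun row => row))) fila
  let news := PySem.List.dedup
    (((base.flatMap String.toList).filter
        (fun c => (PySem.Chars.isalpha c || PySem.Chars.isdigit c)
                  && !(PySem.Set.contains existing (String.singleton c)))).map String.singleton)
  if columnas ≤ 0 ∨ (fila.length : Int) > columnas then tabla
  else
    let stream := fila ++ news
    tabla ++ (PySem.List.pyRange 0 (PySem.Int.floordiv (stream.length : Int) columnas) 1).map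
        (fun i => PySem.List.slice stream (some (i * columnas)) (some ((i + 1) * columnas)))

-- ===== PRECONDITION & SPEC =====
-- When columnas == 0 and fila == [], A's flush test len(fila)==columnas fires on the empty buffer
-- and A returns tabla with a spurious empty row appended; B returns tabla unchanged, the intended
-- value since a 0-column table has no completable rows.
def D_completar_tabla (tabla : List (List String)) (columnas : Int) (fila : List String) (base : List String) : Prop := columnas = 0 ∧ fila = []
instance (tabla : List (List String)) (columnas : Int) (fila : List String) (base : List String) : Decidable (D_completar_tabla tabla columnas fila base) := by unfold D_completar_tabla; infer_instance

def Spec_completar_tabla (tabla : List (List String)) (columnas : Int) (fila : List String) (base : List String) (out : List (List String)) : Prop := ¬ D_completar_tabla tabla columnas fila base → out = completar_tabla_alt tabla columnas fila base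
instance (tabla : List (List String)) (columnas : Int) (fila : List String) (base : List String) (out : List (List String)) : Decidable (Spec_completar_tabla tabla columnas fila base out) := by unfold Spec_completar_tabla; infer_instance

def pvDiffWitness_completar_tabla : List (List String) × Int × List String × List String := ([], 0, [], ["a"])
def pvDiffWitnessOut_completar_tabla : (List (List String)) × (List (List String)) := ([[]], [])

-- ===== CLAIM (what is proved, stated in full; the proofs are below) =====
def Claim_unchanged_completar_tabla : Prop := ∀ (tabla : List (List String)) (columnas : Int) (fila : List String) (base : List String), Dom_completar_tabla tabla columnas fila base → Spec_completar_tabla tabla columnas fila base (completar_tabla tabla columnas fila base)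
def Claim_changed_completar_tabla : Prop := Dom_completar_tabla (pvDiffWitness_completar_tabla.1) (pvDiffWitness_completar_tabla.2.1) (pvDiffWitness_completar_tabla.2.2.1) (pvDiffWitness_completar_tabla.2.2.2) ∧ D_completar_tabla (pvDiffWitness_completar_tabla.1) (pvDiffWitness_completar_tabla.2.1) (pvDiffWitness_completar_tabla.2.2.1) (pvDiffWitness_completar_tabla.2.2.2) ∧ completar_tabla (pvDiffWitness_completar_tabla.1) (pvDiffWitness_completar_tabla.2.1) (pvDiffWitness_completar_tabla.2.2.1) (pvDiffWitness_completar_tabla.2.2.2) = pvDiffWitnessOut_completar_tabla.1 ∧ completar_tabla_alt (pvDiffWitness_completar_tabla.1) (pvDiffWitness_completar_tabla.2.1) (pvDiffWitness_completar_tabla.2.2.1) (pvDiffWitness_completar_tabla.2.2.2) = pvDiffWitnessOut_completar_tabla.2 ∧ pvDiffWitnessOut_completar_tabla.1 ≠ pvDiffWitnessOut_completar_tabla.2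
def Claim_exact_completar_tabla : Prop := ∀ (tabla : List (List String)) (columnas : Int) (fila : List String) (base : List String), Dom_completar_tabla tabla columnas fila base → D_completar_tabla tabla columnas fila base → completar_tabla tabla columnas fila base ≠ completar_tabla_alt tabla columnas fila base

-- ===== LEMMAS AND PROOFS =====

-- elements currently stored in a packing state, in insertion order
def elems (st : List (List String) × List String) : List String :=
  st.1.flatMap (fun row => row) ++ st.2

-- the flush-then-append step of A's packing, isolated
def pasoPack (columnas : Int) (st : List (List String) × List String) (s : String) :
    List (List String) × List String :=
  if ((st.2.length : Int) == columnas) then (st.1 ++ [st.2], [s])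
  else (st.1, st.2 ++ [s])

-- A's trailing flush
def finalizeP (columnas : Int) (st : List (List String) × List String) : List (List String) :=
  if ((st.2.length : Int) == columnas) then st.1 ++ [st.2] else st.1

-- the fresh valid characters, in order, relative to a growing seen set
def newsF (seen : PySem.Set String) : List Char → List String
  | [] => []
  | c :: cs =>
    if validar_caracter c && !(PySem.Set.contains seen (String.singleton c)) then
      String.singleton c :: newsF (PySem.Set.add seen (String.singleton c)) cs
    else newsF seen cs

-- full k-sized chunks of a list, recursively
def chunks (k : Nat) (l : List String) : List (List String) :=
  if h : 0 < k ∧ k ≤ l.length then l.take k :: chunks k (l.drop k) else []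
termination_by l.length
decreasing_by simp only [List.length_drop]; omega

theorem elems_pasoPack (columnas : Int) (st : List (List String) × List String) (s : String) :
    elems (pasoPack columnas st s) = elems st ++ [s] := by
  unfold pasoPack elems; split <;> simp

theorem existe_eq (tabla : List (List String)) (fila : List String) (c : Char) :
    existe_caracter tabla fila c =
      (decide (String.singleton c ∈ elems (tabla, fila)) || !(validar_caracter c)) := by
  unfold existe_caracter elems
  by_cases h1 : ∃ t ∈ tabla, String.singleton c ∈ t <;>
    by_cases h2 : String.singleton c ∈ fila <;>
      simp [h1, h2]

theorem pasoA_eq (columnas : Int) (st : List (List String) × List String) (c : Char) :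
    pasoA columnas st c =
      (if validar_caracter c && !(decide (String.singleton c ∈ elems st)) then
        pasoPack columnas st (String.singleton c) else st) := by
  unfold pasoA pasoPack
  rw [existe_eq st.1 st.2 c]
  by_cases hv : validar_caracter c <;> by_cases hm : String.singleton c ∈ elems st <;>
    simp [hv, elems]

theorem contains_add (s : PySem.Set String) (x y : String) :
    PySem.Set.contains (PySem.Set.add s x) y = (PySem.Set.contains s y || y == x) := by
  rw [Bool.eq_iff_iff]
  simp [PySem.Set.contains_iff, PySem.Set.mem_add, beq_iff_eq]

-- folding a nested per-string loop equals folding over the flattened character stream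
theorem foldl_nested {α : Type} (g : α → Char → α) (base : List String) (st : α) :
    base.foldl (fun st f => f.toList.foldl g st) st = (base.flatMap String.toList).foldl g st := by
  induction base generalizing st with
  | nil => rfl
  | cons f rest ih => simp [List.foldl_append, ih]

-- main simulation: A's fused loop = packing of the fresh-character list
theorem sim (k : Int) (chars : List Char) (st0 : List (List String) × List String)
    (seen : PySem.Set String)
    (hinv : ∀ s : String, PySem.Set.contains seen s = true ↔ s ∈ elems st0) :
    chars.foldl (pasoA k) st0 = (newsF seen chars).foldl (pasoPack k) st0 := by
  induction chars generalizing st0 seen with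
  | nil => rfl
  | cons c rest ih =>
    simp only [List.foldl_cons]
    rw [pasoA_eq]
    by_cases hv : validar_caracter c
    · by_cases hm : String.singleton c ∈ elems st0
      · have hc : PySem.Set.contains seen (String.singleton c) = true := (hinv _).mpr hm
        simp only [newsF, hv, hc, Bool.not_true, Bool.and_false, if_neg Bool.false_ne_true,
          hm, decide_true, Bool.true_and]
        exact ih st0 seen hinv
      · have hc : PySem.Set.contains seen (String.singleton c) = false := by
          cases h : PySem.Set.contains seen (String.singleton c)
          · rfl
          · exact absurd ((hinv _).mp h) hm
        simp only [newsF, hv, hc, Bool.not_false, Bool.and_true, if_pos, hm, decide_false,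
          Bool.true_and, List.foldl_cons]
        apply ih
        intro s
        rw [contains_add, elems_pasoPack]
        simp only [Bool.or_eq_true, PySem.Set.contains_iff, beq_iff_eq, List.mem_append,
          List.mem_singleton]
        rw [← PySem.Set.contains_iff, hinv s]
    · simp only [newsF, hv, Bool.false_and, if_neg Bool.false_ne_true]
      exact ih st0 seen hinv

-- the ordered set-dedup of the filtered characters is exactly newsF
theorem dedup_eq_newsF (chars : List Char) (E acc seen : PySem.Set String)
    (hseen : ∀ s : String, PySem.Set.contains seen s
        = (PySem.Set.contains E s || PySem.Set.contains acc s)) :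
    ((chars.filter (fun c => validar_caracter c
        && !(PySem.Set.contains E (String.singleton c)))).map String.singleton).foldl
          PySem.Set.add acc
      = acc ++ newsF seen chars := by
  induction chars generalizing acc seen with
  | nil => simp [newsF]
  | cons c cs ih =>
    by_cases hv : validar_caracter c
    · by_cases hE : PySem.Set.contains E (String.singleton c) = true
      · have hs : PySem.Set.contains seen (String.singleton c) = true := by
          rw [hseen, hE]; exact Bool.true_or _
        simp only [List.filter_cons, hv, hE, Bool.not_true, Bool.and_false,
          newsF, hs, Bool.true_and, if_neg Bool.false_ne_true]
        exact ih acc seen hseen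
      · have hE' : PySem.Set.contains E (String.singleton c) = false := by
          cases h : PySem.Set.contains E (String.singleton c)
          · rfl
          · exact absurd h hE
        by_cases hA : PySem.Set.contains acc (String.singleton c) = true
        · have hs : PySem.Set.contains seen (String.singleton c) = true := by
            rw [hseen, hA]; exact Bool.or_true _
          have hadd : PySem.Set.add acc (String.singleton c) = acc := by
            unfold PySem.Set.add; rw [hA]; simp only [if_true]
          simp only [List.filter_cons, hv, hE', Bool.not_false, Bool.and_true,
            if_pos, List.map_cons, List.foldl_cons, hadd, newsF, hs, Bool.true_and,
            Bool.not_true, Bool.and_false, if_neg Bool.false_ne_true]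
          exact ih acc seen hseen
        · have hA' : PySem.Set.contains acc (String.singleton c) = false := by
            cases h : PySem.Set.contains acc (String.singleton c)
            · rfl
            · exact absurd h hA
          have hs : PySem.Set.contains seen (String.singleton c) = false := by
            rw [hseen, hA', hE']; rfl
          have hadd : PySem.Set.add acc (String.singleton c) = acc ++ [String.singleton c] := by
            unfold PySem.Set.add; rw [hA']; simp only [Bool.false_eq_true, if_false]
          simp only [List.filter_cons, hv, hE', Bool.not_false, Bool.and_true, if_pos,
            List.map_cons, List.foldl_cons, hadd, newsF, hs, Bool.true_and]
          rw [ih (acc ++ [String.singleton c]) (PySem.Set.add seen (String.singleton c))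
            (by
              intro s
              rw [contains_add, hseen]
              have : PySem.Set.contains (acc ++ [String.singleton c]) s
                  = PySem.Set.contains (PySem.Set.add acc (String.singleton c)) s := by
                rw [hadd]
              rw [this, contains_add]
              cases PySem.Set.contains E s <;> cases PySem.Set.contains acc s <;> simp)]
          simp
    · simp only [List.filter_cons, hv, Bool.false_and, if_neg Bool.false_ne_true, newsF]
      exact ih acc seen hseen

-- packing the news list and flushing = tabla ++ full chunks of fila ++ news
theorem pack_chunks (k : Int) (hk : 0 < k) :
    ∀ (news : List String) (tabla : List (List String)) (fila : List String),
      (fila.length : Int) ≤ k →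
      finalizeP k (news.foldl (pasoPack k) (tabla, fila)) = tabla ++ chunks k.toNat (fila ++ news) := by
  intro news
  induction news with
  | nil =>
    intro tabla fila hle
    simp only [List.foldl_nil, finalizeP, List.append_nil]
    by_cases hl : ((fila.length : Int) == k)
    · have hlen : fila.length = k.toNat := by
        have := beq_iff_eq.mp hl; omega
      rw [if_pos hl, chunks, dif_pos (by omega)]
      rw [← hlen, List.take_length, List.drop_length, chunks, dif_neg (by simp only [List.length_nil]; omega)]
    · have hlt : fila.length < k.toNat := by
        have : ¬ ((fila.length : Int) = k) := by simpa using hl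
        omega
      rw [if_neg hl, chunks, dif_neg (by omega)]
      simp
  | cons s rest ih =>
    intro tabla fila hle
    simp only [List.foldl_cons]
    by_cases hl : ((fila.length : Int) == k)
    · have hlen : fila.length = k.toNat := by
        have := beq_iff_eq.mp hl; omega
      have hstep : pasoPack k (tabla, fila) s = (tabla ++ [fila], [s]) := by
        unfold pasoPack; rw [if_pos hl]
      rw [hstep, ih (tabla ++ [fila]) [s] (by simp; omega)]
      have hchunk : chunks k.toNat (fila ++ s :: rest) = fila :: chunks k.toNat (s :: rest) := by
        rw [chunks, dif_pos (by simp only [List.length_append, List.length_cons]; omega)]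
        rw [← hlen, List.take_left, List.drop_left]
      rw [hchunk]
      simp
    · have hlt : (fila.length : Int) < k := by
        have : ¬ ((fila.length : Int) = k) := by simpa using hl
        omega
      have hstep : pasoPack k (tabla, fila) s = (tabla, fila ++ [s]) := by
        unfold pasoPack; rw [if_neg (by simpa using hl)]
      rw [hstep, ih tabla (fila ++ [s]) (by simp; omega)]
      simp

-- chunks in closed form over List.range
theorem chunks_range (kn : Nat) (hk : 0 < kn) :
    ∀ (s : List String), chunks kn s
      = (List.range (s.length / kn)).map (fun j => (s.drop (j * kn)).take kn) := by
  intro s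
  induction hn : s.length using Nat.strong_induction_on generalizing s with
  | _ n ihn =>
    subst hn
    by_cases h : kn ≤ s.length
    · rw [chunks, dif_pos ⟨hk, h⟩]
      have hq : s.length / kn = (s.length - kn) / kn + 1 := Nat.div_eq_sub_div hk h
      have hlen : (s.drop kn).length = s.length - kn := by simp
      have hrec := ihn (s.drop kn).length (by simp; omega) (s.drop kn) rfl
      rw [hrec, hlen, hq, List.range_succ_eq_map]
      simp only [List.map_cons, List.map_map]
      congr 1
      · simp
      · apply List.map_congr_left
        intro j _
        simp only [Function.comp]
        rw [List.drop_drop]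
        congr 2
        rw [Nat.succ_mul, Nat.add_comm]
    · rw [chunks, dif_neg (by omega)]
      have : s.length / kn = 0 := Nat.div_eq_of_lt (by omega)
      rw [this]
      simp
-- B's pyRange/slice comprehension computes the same chunks
theorem slice_map (k : Int) (hk : 0 < k) (stream : List String) :
    (PySem.List.pyRange 0 (PySem.Int.floordiv (stream.length : Int) k) 1).map
        (fun i => PySem.List.slice stream (some (i * k)) (some ((i + 1) * k)))
      = (List.range (stream.length / k.toNat)).map
          (fun j => (stream.drop (j * k.toNat)).take k.toNat) := by
  have hkk : ((k.toNat : Int)) = k := Int.toNat_of_nonneg (le_of_lt hk)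
  rw [← hkk, PySem.Int.floordiv_natCast, PySem.List.pyRange_one]
  simp only [sub_zero, Int.toNat_natCast, List.map_map]
  apply List.map_congr_left
  intro j _
  simp only [Function.comp, zero_add]
  have h1 : (j : Int) * (k.toNat : Int) = ((j * k.toNat : Nat) : Int) := by push_cast; ring
  have h2 : ((j : Int) + 1) * (k.toNat : Int) = ((j * k.toNat : Nat) : Int) + ((k.toNat : Nat) : Int) := by
    push_cast; ring
  rw [h1, h2, PySem.List.slice_natCast_add]

-- on inputs whose partial row is already longer than columnas, A can never flush
theorem stuck (k : Int) :
    ∀ (chars : List Char) (tabla : List (List String)) (fila : List String),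
      k < (fila.length : Int) →
      ∃ f : List String, chars.foldl (pasoA k) (tabla, fila) = (tabla, f) ∧ k < (f.length : Int) := by
  intro chars
  induction chars with
  | nil => exact fun tabla fila h => ⟨fila, rfl, h⟩
  | cons c cs ih =>
    intro tabla fila h
    simp only [List.foldl_cons]
    unfold pasoA
    by_cases he : existe_caracter tabla fila c
    · simp only [he, Bool.not_true, if_neg Bool.false_ne_true]
      exact ih tabla fila h
    · have he' : existe_caracter tabla fila c = false := by
        cases h2 : existe_caracter tabla fila c
        · rfl
        · exact absurd h2 he
      simp only [he', Bool.not_false, if_pos]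
      rw [if_neg (by simp; omega)]
      exact ih tabla (fila ++ [String.singleton c]) (by simp; omega)

-- in the D region (columnas = 0, fila = []) A flushes exactly one empty row
theorem zeroInv (tabla : List (List String)) :
    ∀ (chars : List Char) (st : List (List String) × List String),
      (st = (tabla, ([] : List String)) ∨ (st.1 = tabla ++ [[]] ∧ st.2 ≠ [])) →
      (chars.foldl (pasoA 0) st = (tabla, ([] : List String)) ∨
        ((chars.foldl (pasoA 0) st).1 = tabla ++ [[]] ∧ (chars.foldl (pasoA 0) st).2 ≠ [])) := by
  intro chars
  induction chars with
  | nil => exact fun st h => h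
  | cons c cs ih =>
    intro st h
    simp only [List.foldl_cons]
    apply ih
    unfold pasoA
    by_cases he : existe_caracter st.1 st.2 c
    · simp only [he, Bool.not_true, if_neg Bool.false_ne_true]
      exact h
    · have he' : existe_caracter st.1 st.2 c = false := by
        cases h2 : existe_caracter st.1 st.2 c
        · rfl
        · exact absurd h2 he
      simp only [he', Bool.not_false, if_pos]
      rcases h with h | ⟨h1, h2⟩
      · rw [h]
        simp
      · rw [if_neg (by
          rcases List.exists_cons_of_ne_nil h2 with ⟨a, l, hl⟩
          simp [hl]; omega)]
        right
        constructor
        · simpa using h1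
        · simp

theorem zeroCase (tabla : List (List String)) (chars : List Char) :
    finalizeP 0 (chars.foldl (pasoA 0) (tabla, [])) = tabla ++ [[]] := by
  rcases zeroInv tabla chars (tabla, []) (Or.inl rfl) with h | ⟨h1, h2⟩
  · rw [h]; unfold finalizeP; simp
  · unfold finalizeP
    rw [if_neg (by
      rcases List.exists_cons_of_ne_nil h2 with ⟨a, l, hl⟩
      simp [hl]; omega)]
    exact h1

-- membership in B's `existing` set = membership in A's initial state
theorem existing_inv (tabla : List (List String)) (fila : List String) (s : String) :
    PySem.Set.contains (PySem.Set.union (PySem.Set.ofList (tabla.flatMap (fun row => row))) fila) s = true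
      ↔ s ∈ elems (tabla, fila) := by
  rw [PySem.Set.contains_iff, PySem.Set.mem_union, PySem.Set.mem_ofList]
  unfold elems
  simp

-- ===== VERDICT (by name: the statement is the Claim_ definition above) =====
theorem completar_tabla_spec : Claim_unchanged_completar_tabla := by
  intro tabla k fila base _ hD
  have hA : completar_tabla tabla k fila base
      = finalizeP k ((base.flatMap String.toList).foldl (pasoA k) (tabla, fila)) := by
    unfold completar_tabla finalizeP
    rw [foldl_nested]
  by_cases hmain : 0 < k ∧ (fila.length : Int) ≤ k
  · -- main path: closed-form chunking
    obtain ⟨hk, hle⟩ := hmain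
    set chars := base.flatMap String.toList with hchars
    set existing := PySem.Set.union (PySem.Set.ofList (tabla.flatMap (fun row => row))) fila with hex
    have h1 : completar_tabla tabla k fila base
        = finalizeP k ((newsF existing chars).foldl (pasoPack k) (tabla, fila)) := by
      rw [hA, sim k chars (tabla, fila) existing (existing_inv tabla fila)]
    have hnews : PySem.List.dedup
        ((chars.filter (fun c => (PySem.Chars.isalpha c || PySem.Chars.isdigit c)
            && !(PySem.Set.contains existing (String.singleton c)))).map String.singleton)
        = newsF existing chars := by
      have := dedup_eq_newsF chars existing PySem.Set.empty existing
        (by intro s; simp [PySem.Set.empty, PySem.Set.contains])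
      simp only [PySem.List.dedup_eq_ofList, PySem.Set.ofList_eq_foldl] at *
      simpa [validar_caracter, PySem.Set.empty] using this
    rw [h1, pack_chunks k hk _ tabla fila hle]
    simp only [completar_tabla_alt]
    rw [if_neg (by push_neg; omega)]
    rw [slice_map k hk, ← chunks_range k.toNat (by omega)]
    rw [← hchars, ← hex, hnews]
  · -- degenerate path: both return tabla
    have hlt : k < (fila.length : Int) := by
      push_neg at hmain
      by_cases hk : 0 < k
      · exact hmain hk
      · -- k ≤ 0; fila ≠ [] or k < 0 since ¬ D
        unfold D_completar_tabla at hD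
        push_neg at hD
        rcases lt_or_eq_of_le (not_lt.mp hk) with h | h
        · omega
        · have : fila ≠ [] := hD h
          rcases List.exists_cons_of_ne_nil this with ⟨a, l, hl⟩
          simp [hl]; omega
    obtain ⟨f, hf, hflen⟩ := stuck k (base.flatMap String.toList) tabla fila hlt
    rw [hA, hf]
    unfold finalizeP
    rw [if_neg (by simp; omega)]
    unfold completar_tabla_alt
    rw [if_pos (Or.inr hlt)]

theorem completar_tabla_changed : Claim_changed_completar_tabla := by
  unfold Claim_changed_completar_tabla; decide

theorem completar_tabla_tight : Claim_exact_completar_tabla := by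
  intro tabla k fila base _ hD
  obtain ⟨hk, hf⟩ := hD
  subst hk; subst hf
  have hA : completar_tabla tabla 0 [] base = tabla ++ [[]] := by
    unfold completar_tabla
    rw [foldl_nested]
    exact zeroCase tabla (base.flatMap String.toList)
  have hB : completar_tabla_alt tabla 0 [] base = tabla := by
    unfold completar_tabla_alt
    rw [if_pos (Or.inl le_rfl)]
  rw [hA, hB]
  intro h
  have := congrArg List.length h
  simp at this
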